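-- pv_equiv track=rewrite | github.com/Vahid-Kosari/fenjan_website | fenjan/linkedin.py | filter_positions
-- ===== SOURCE A (Python) =====
-- def filter_positions(all_positions, search_keywords):
--     """Filter the list of positions based on search keywords.
--
--     Args:
--         all_positions (list): list of positions
--         search_keywords (list): list of keywords to filter positions by
--
--     Returns:
--         list: list of positions that contain at least one of the search keywords
--     """
--     # Exclude populated nations like India and/or China
--     forbidden_keywords = ["india", "+9"]
--     # initialize empty list to store matching positions
--     matching_positions = []
--
--     # loop through each position and check if it contains any of the search keywords
--     for position in all_positions:
--         if any(keyword.lower() in position.lower() for keyword in search_keywords):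
--             if not any(
--                 keyword.lower() in position.lower() for keyword in forbidden_keywords
--             ):
--                 matching_positions.append(position)
--
--     return matching_positions
-- ===== SOURCE B (Python) =====
-- def filter_positions(all_positions, search_keywords):
--     """Keyword-outer index marking: for each search keyword mark the indices of
--     positions containing it into a hits set, mark indices containing a forbidden
--     keyword into a blocked set, then emit unblocked hit positions in order."""
--     lowered = [p.lower() for p in all_positions]
--
--     hits = set()
--     for kw in search_keywords:
--         k = kw.lower()
--         for i, lp in enumerate(lowered):
--             if k in lp:
--                 hits.add(i)
--
--     blocked = set()
--     for bad in ["india", "+9"]: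
--         for i, lp in enumerate(lowered):
--             if bad in lp:
--                 blocked.add(i)
--
--     return [p for i, p in enumerate(all_positions) if i in hits and i not in blocked]
-- ===== Notes on version B (the rewrite author's own statement) =====
-- stated objective: alternative
-- what changed: Inverts the loop nesting: instead of testing each position against nested any() keyword scans, B iterates keywords on the outside, marking indices of matching positions into a hits set and forbidden-matching indices into a blocked set, then emits positions in original order by index-set membership.
import Mathlib
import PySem

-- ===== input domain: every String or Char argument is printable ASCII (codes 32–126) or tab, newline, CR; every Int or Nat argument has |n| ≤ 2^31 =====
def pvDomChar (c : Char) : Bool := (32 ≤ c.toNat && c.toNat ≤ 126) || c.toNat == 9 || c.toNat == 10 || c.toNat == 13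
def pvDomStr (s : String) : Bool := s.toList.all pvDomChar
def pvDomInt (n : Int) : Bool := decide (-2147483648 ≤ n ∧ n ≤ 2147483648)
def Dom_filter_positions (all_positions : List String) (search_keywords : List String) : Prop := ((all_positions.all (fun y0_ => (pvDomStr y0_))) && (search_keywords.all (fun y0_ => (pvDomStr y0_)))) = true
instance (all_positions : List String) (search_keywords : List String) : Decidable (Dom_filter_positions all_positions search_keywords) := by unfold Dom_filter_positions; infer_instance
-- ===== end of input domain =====

-- B inverts the loop nesting: keyword-outer marking of index sets (hits / blocked),
-- then one emission pass by index membership, instead of A's per-position nested any() scans (objective: alternative).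


-- ===== PORT A =====
def filter_positions (all_positions : List String) (search_keywords : List String) : List String :=
  let forbidden_keywords := ["india", "+9"]
  all_positions.foldl
    (fun matching_positions position =>
      if search_keywords.any
          (fun keyword => PySem.Str.isIn (PySem.Str.lower keyword) (PySem.Str.lower position)) then
        if !(forbidden_keywords.any
            (fun keyword => PySem.Str.isIn (PySem.Str.lower keyword) (PySem.Str.lower position))) then
          matching_positions ++ [position]
        else matching_positions
      else matching_positions)
    []

-- ===== PORT B =====
-- inner marking loop: 'for i, lp in enumerate(lowered): if k in lp: s.add(i)'
def fpMark (lowered : List String) (k : String) (s : PySem.Set Int) : PySem.Set Int :=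
  (PySem.List.enumerate lowered).foldl
    (fun s p => if PySem.Str.isIn k p.2 then PySem.Set.add s p.1 else s) s

def filter_positions_alt (all_positions : List String) (search_keywords : List String) : List String :=
  let lowered := all_positions.map (fun p => PySem.Str.lower p)
  let hits := search_keywords.foldl
    (fun s kw => fpMark lowered (PySem.Str.lower kw) s) PySem.Set.empty
  let blocked := (["india", "+9"]).foldl
    (fun s bad => fpMark lowered bad s) PySem.Set.empty
  (PySem.List.enumerate all_positions).foldl
    (fun acc p =>
      if PySem.Set.contains hits p.1 && !(PySem.Set.contains blocked p.1) then
        acc ++ [p.2]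
      else acc) []

-- ===== PRECONDITION & SPEC =====
def Spec_filter_positions (all_positions : List String) (search_keywords : List String) (out : List String) : Prop := out = filter_positions_alt all_positions search_keywords
instance (all_positions : List String) (search_keywords : List String) (out : List String) : Decidable (Spec_filter_positions all_positions search_keywords out) := by unfold Spec_filter_positions; infer_instance

-- ===== CLAIM =====
def Claim_equal_filter_positions : Prop := ∀ (all_positions : List String) (search_keywords : List String), Dom_filter_positions all_positions search_keywords → Spec_filter_positions all_positions search_keywords (filter_positions all_positions search_keywords)

-- ===== LEMMAS AND PROOFS =====

-- membership after one marking pass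
theorem mem_fpMark (lowered : List String) (k : String) (s : PySem.Set Int) (a : Int) :
    a ∈ fpMark lowered k s ↔
      a ∈ s ∨ ∃ (j : Nat) (h : j < lowered.length),
        PySem.Str.isIn k lowered[j] = true ∧ a = (j : Int) := by
  have gen : ∀ (l : List (Int × String)) (s : PySem.Set Int),
      a ∈ l.foldl (fun s p => if PySem.Str.isIn k p.2 then PySem.Set.add s p.1 else s) s ↔
        a ∈ s ∨ ∃ p ∈ l, PySem.Str.isIn k p.2 = true ∧ a = p.1 := by
    intro l
    induction l with
    | nil => simp
    | cons hd tl ih =>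
      intro s
      rw [List.foldl_cons, ih]
      by_cases hc : PySem.Str.isIn k hd.2 = true
      · rw [if_pos hc]
        simp only [PySem.Set.mem_add, List.mem_cons]
        constructor
        · rintro ((h | rfl) | ⟨p, hp, hk, ha⟩)
          · exact Or.inl h
          · exact Or.inr ⟨hd, Or.inl rfl, hc, rfl⟩
          · exact Or.inr ⟨p, Or.inr hp, hk, ha⟩
        · rintro (h | ⟨p, (rfl | hp), hk, ha⟩)
          · exact Or.inl (Or.inl h)
          · exact Or.inl (Or.inr ha)
          · exact Or.inr ⟨p, hp, hk, ha⟩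
      · rw [if_neg hc]
        simp only [List.mem_cons]
        constructor
        · rintro (h | ⟨p, hp, hk, ha⟩)
          · exact Or.inl h
          · exact Or.inr ⟨p, Or.inr hp, hk, ha⟩
        · rintro (h | ⟨p, (rfl | hp), hk, ha⟩)
          · exact Or.inl h
          · exact absurd hk hc
          · exact Or.inr ⟨p, hp, hk, ha⟩
  rw [fpMark, gen]
  constructor
  · rintro (h | ⟨p, hp, hk, ha⟩)
    · exact Or.inl h
    · rcases (PySem.List.mem_enumerate_iff _ _ _).1 hp with ⟨j, hj, rfl⟩
      exact Or.inr ⟨j, hj, by simpa using hk, by simpa using ha⟩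
  · rintro (h | ⟨j, hj, hk, ha⟩)
    · exact Or.inl h
    · refine Or.inr ⟨((j : Int), lowered[j]), ?_, hk, ha⟩
      exact (PySem.List.mem_enumerate_iff _ _ _).2 ⟨j, hj, by simp⟩

-- membership after the keyword-outer marking loop
theorem mem_markAll (lowered : List String) (kws : List String) (s : PySem.Set Int) (a : Int) :
    a ∈ kws.foldl (fun s kw => fpMark lowered (PySem.Str.lower kw) s) s ↔
      a ∈ s ∨ ∃ kw ∈ kws, ∃ (j : Nat) (h : j < lowered.length),
        PySem.Str.isIn (PySem.Str.lower kw) lowered[j] = true ∧ a = (j : Int) := by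
  induction kws generalizing s with
  | nil => simp
  | cons hd tl ih =>
    simp only [List.foldl_cons, ih, mem_fpMark, List.mem_cons]
    constructor
    · rintro ((h | ⟨j, hj, hk, ha⟩) | ⟨kw, hkw, rest⟩)
      · exact Or.inl h
      · exact Or.inr ⟨hd, Or.inl rfl, j, hj, hk, ha⟩
      · exact Or.inr ⟨kw, Or.inr hkw, rest⟩
    · rintro (h | ⟨kw, (rfl | hkw), rest⟩)
      · exact Or.inl (Or.inl h)
      · exact Or.inl (Or.inr rest)
      · exact Or.inr ⟨kw, hkw, rest⟩

-- generic: a filtered enumeration projected to the elements is a filter of the elements,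
-- when the test agrees pointwise on the pairs
theorem filter_map_of_pointwise {α β : Type} (l : List α) (q : α → Bool) (P : β → Bool)
    (f : α → β) (h : ∀ p ∈ l, q p = P (f p)) :
    (l.filter q).map f = (l.map f).filter P := by
  induction l with
  | nil => rfl
  | cons hd tl ih =>
    have hhd := h hd (List.mem_cons_self)
    have ih' := ih (fun p hp => h p (List.mem_cons_of_mem _ hp))
    simp only [List.filter_cons, List.map_cons, hhd]
    by_cases hc : P (f hd) = true
    · simp [hc, ih']
    · simp only [Bool.not_eq_true] at hc
      simp [hc, ih']

-- A's test stated on one position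
theorem fpPred_forbidden (p : String) :
    (["india", "+9"]).any
        (fun keyword => PySem.Str.isIn (PySem.Str.lower keyword) (PySem.Str.lower p))
      = (["india", "+9"]).any (fun bad => PySem.Str.isIn bad (PySem.Str.lower p)) := by
  have h1 : PySem.Str.lower "india" = "india" := by decide
  have h2 : PySem.Str.lower "+9" = "+9" := by decide
  rw [List.any_cons, List.any_cons, List.any_nil, List.any_cons, List.any_cons, List.any_nil,
    h1, h2]

-- specialization of mem_fpMark at a natural index
theorem mem_fpMark_nat (lowered : List String) (k : String) (s : PySem.Set Int)
    (j : Nat) (hj : j < lowered.length) :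
    ((j : Int) ∈ fpMark lowered k s) ↔
      ((j : Int) ∈ s ∨ PySem.Str.isIn k lowered[j] = true) := by
  rw [mem_fpMark]
  constructor
  · rintro (h | ⟨j', hj', hk, hje⟩)
    · exact Or.inl h
    · have : j' = j := by exact_mod_cast hje.symm
      subst this
      exact Or.inr hk
  · rintro (h | hk)
    · exact Or.inl h
    · exact Or.inr ⟨j, hj, hk, rfl⟩

-- ===== VERDICT =====
theorem filter_positions_spec : Claim_equal_filter_positions := by
  intro all_positions search_keywords _
  show filter_positions all_positions search_keywords
      = filter_positions_alt all_positions search_keywords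
  unfold filter_positions filter_positions_alt
  simp only []
  set xs := all_positions with hxs
  set SK := search_keywords with hSK
  set lowered := xs.map (fun p => PySem.Str.lower p) with hlow
  set hits := SK.foldl (fun s kw => fpMark lowered (PySem.Str.lower kw) s) PySem.Set.empty with hhits
  set blocked := (["india", "+9"]).foldl (fun s bad => fpMark lowered bad s) PySem.Set.empty with hblk
  -- A side: single-test form then filter
  have hA : xs.foldl
      (fun matching_positions position =>
        if SK.any (fun keyword => PySem.Str.isIn (PySem.Str.lower keyword) (PySem.Str.lower position)) then
          if !((["india", "+9"]).any (fun keyword => PySem.Str.isIn (PySem.Str.lower keyword) (PySem.Str.lower position))) then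
            matching_positions ++ [position]
          else matching_positions
        else matching_positions) []
      = xs.filter (fun p =>
          SK.any (fun kw => PySem.Str.isIn (PySem.Str.lower kw) (PySem.Str.lower p)) &&
          !((["india", "+9"]).any (fun bad => PySem.Str.isIn bad (PySem.Str.lower p)))) := by
    rw [show (fun (matching_positions : List String) (position : String) =>
        if SK.any (fun keyword => PySem.Str.isIn (PySem.Str.lower keyword) (PySem.Str.lower position)) then
          if !((["india", "+9"]).any (fun keyword => PySem.Str.isIn (PySem.Str.lower keyword) (PySem.Str.lower position))) then
            matching_positions ++ [position]
          else matching_positions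
        else matching_positions)
      = (fun (acc : List String) (p : String) =>
          if (SK.any (fun kw => PySem.Str.isIn (PySem.Str.lower kw) (PySem.Str.lower p)) &&
              !((["india", "+9"]).any (fun bad => PySem.Str.isIn bad (PySem.Str.lower p)))) then
            acc ++ [p] else acc) from ?_]
    · exact PySem.List.foldl_append_if_eq_filter _ xs []
    · funext acc p
      rw [← fpPred_forbidden]
      cases ha : SK.any (fun kw => PySem.Str.isIn (PySem.Str.lower kw) (PySem.Str.lower p)) <;>
        cases hb : (["india", "+9"]).any
            (fun kw => PySem.Str.isIn (PySem.Str.lower kw) (PySem.Str.lower p)) <;> simp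
  rw [hA]
  -- B side: fold is a filtered enumeration
  rw [PySem.List.foldl_append_if
      (p := fun p : Int × String => PySem.Set.contains hits p.1 && !(PySem.Set.contains blocked p.1))
      (f := fun p : Int × String => p.2)]
  rw [List.nil_append]
  rw [filter_map_of_pointwise (PySem.List.enumerate xs)
      (fun p => PySem.Set.contains hits p.1 && !(PySem.Set.contains blocked p.1))
      (fun p => SK.any (fun kw => PySem.Str.isIn (PySem.Str.lower kw) (PySem.Str.lower p)) &&
          !((["india", "+9"]).any (fun bad => PySem.Str.isIn bad (PySem.Str.lower p))))
      (fun p => p.2) ?_]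
  · rw [PySem.List.map_snd_enumerate]
  · intro p hp
    rcases (PySem.List.mem_enumerate_iff _ _ _).1 hp with ⟨j, hj, rfl⟩
    simp only [zero_add]
    have hlen : j < lowered.length := by simp [hlow, hj]
    have hjl : lowered[j] = PySem.Str.lower xs[j] := by simp [hlow]
    -- hits membership at index j
    have hmemH : ((j : Int) ∈ hits) ↔
        ∃ kw ∈ SK, PySem.Str.isIn (PySem.Str.lower kw) (PySem.Str.lower xs[j]) = true := by
      rw [hhits, mem_markAll]
      constructor
      · rintro (h | ⟨kw, hkw, j', hj', hk, hje⟩)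
        · simp [PySem.Set.empty] at h
        · have : j' = j := by exact_mod_cast hje.symm
          subst this
          exact ⟨kw, hkw, by rwa [hjl] at hk⟩
      · rintro ⟨kw, hkw, hk⟩
        exact Or.inr ⟨kw, hkw, j, hlen, by rwa [hjl], rfl⟩
    -- blocked membership at index j
    have hmemB : ((j : Int) ∈ blocked) ↔
        (PySem.Str.isIn "india" (PySem.Str.lower xs[j]) = true ∨
         PySem.Str.isIn "+9" (PySem.Str.lower xs[j]) = true) := by
      rw [hblk]
      simp only [List.foldl_cons, List.foldl_nil]
      rw [mem_fpMark_nat lowered _ _ j hlen, mem_fpMark_nat lowered _ _ j hlen, hjl]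
      simp [PySem.Set.empty]
    have hhit : PySem.Set.contains hits (j : Int)
        = SK.any (fun kw => PySem.Str.isIn (PySem.Str.lower kw) (PySem.Str.lower xs[j])) := by
      rw [Bool.eq_iff_iff, PySem.Set.contains_iff, hmemH, List.any_eq_true]
    have hblkc : PySem.Set.contains blocked (j : Int)
        = (["india", "+9"]).any (fun bad => PySem.Str.isIn bad (PySem.Str.lower xs[j])) := by
      rw [Bool.eq_iff_iff, PySem.Set.contains_iff, hmemB]
      simp [List.any_cons]
    simp only [hhit, hblkc]
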